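-- pv_equiv track=rewrite | github.com/ad-str/huge-leetcode-guy | OA Prep/PalantirOA.py | helper
-- ===== SOURCE A (Python) =====
-- def helper(n):
--     res = []
--     prime = [True] * n
--     for i in range(2, n):
--         if prime[i]:
--             j = 2
--             while i*j < n:
--                 prime[i*j] = False
--                 j += 1
--             if i % 10 == 3:
--                 res.append(i)
--     return res
-- ===== SOURCE B (Python) =====
-- def _is_prime(i):
--     d = 2
--     while d * d <= i:
--         if i % d == 0:
--             return False
--         d += 1
--     return True
--
-- def helper(n):
--     return [i for i in range(2, n) if i % 10 == 3 and _is_prime(i)]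
-- ===== Notes on version B (the rewrite author's own statement) =====
-- stated objective: simpler
-- what changed: Replaces the boolean sieve array and its multiple-marking inner loop by an independent trial-division primality test (no divisor d with d*d <= i) inside a single comprehension.
import Mathlib
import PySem

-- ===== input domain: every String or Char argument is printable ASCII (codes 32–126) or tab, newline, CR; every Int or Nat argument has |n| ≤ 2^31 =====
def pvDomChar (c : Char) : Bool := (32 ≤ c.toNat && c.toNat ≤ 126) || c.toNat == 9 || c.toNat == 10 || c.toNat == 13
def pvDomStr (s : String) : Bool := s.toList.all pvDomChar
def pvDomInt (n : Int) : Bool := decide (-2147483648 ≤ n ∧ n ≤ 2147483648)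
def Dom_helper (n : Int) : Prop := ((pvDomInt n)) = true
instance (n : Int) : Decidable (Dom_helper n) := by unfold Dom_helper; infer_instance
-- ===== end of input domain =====

-- B replaces A's boolean sieve array and multiple-marking inner loop by an independent
-- trial-division primality test per number (simpler, not faster).

-- ===== PORT A =====
-- The boolean array `prime` of length n is represented by its lookup function; every index
-- the Python reads or writes (i with 2 ≤ i < n, and i*j with i*j < n) is in range, so the
-- representation is exact.  `markA` is the inner `while i*j < n` loop (the `1 ≤ i` part of
-- the guard only makes the recursion total; the loop is entered with i ≥ 2 only).
def markA (n i j : Int) (p : Int → Bool) : Int → Bool :=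
  if h : 1 ≤ i ∧ i * j < n then
    markA n i (j + 1) (fun m => if m = i * j then false else p m)
  else p
termination_by (n - i * j).toNat
decreasing_by
  have h2 : i * (j + 1) = i * j + i := by ring
  omega

def stepA (n : Int) (st : List Int × (Int → Bool)) (i : Int) : List Int × (Int → Bool) :=
  if st.2 i then
    (if i % 10 = 3 then st.1 ++ [i] else st.1, markA n i 2 st.2)
  else st

def helper (n : Int) : List Int :=
  ((PySem.List.pyRange 2 n 1).foldl (stepA n) ([], fun _ => true)).1

-- ===== PORT B =====
-- trial division: no divisor d with d*d ≤ i (the `1 ≤ d` guard only makes it total; it is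
-- always called with d ≥ 2)
def isPrimeTD (i d : Int) : Bool :=
  if h : 1 ≤ d ∧ d * d ≤ i then
    (if i % d = 0 then false else isPrimeTD i (d + 1))
  else true
termination_by (i + 1 - d).toNat
decreasing_by
  have h2 : d ≤ d * d := le_mul_of_one_le_left (by omega) h.1
  omega

def helper_alt (n : Int) : List Int :=
  (PySem.List.pyRange 2 n 1).filter (fun i => decide (i % 10 = 3) && isPrimeTD i 2)

-- ===== PRECONDITION & SPEC =====
def Spec_helper (n : Int) (out : List Int) : Prop := out = helper_alt n
instance (n : Int) (out : List Int) : Decidable (Spec_helper n out) := by unfold Spec_helper; infer_instance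

-- ===== CLAIM (what is proved, stated in full; the proofs are below) =====
def Claim_equal_helper : Prop := ∀ (n : Int), Dom_helper n → Spec_helper n (helper n)

-- ===== LEMMAS AND PROOFS =====

-- m is "marked by stage k": it is a multiple a*b with 2 ≤ a ≤ k, 2 ≤ b
def Comp (k m : Int) : Prop := ∃ a b, 2 ≤ a ∧ a ≤ k ∧ 2 ≤ b ∧ a * b = m

theorem markA_spec (n i j : Int) (p : Int → Bool) (hi : 1 ≤ i) (m : Int) :
    markA n i j p m = true ↔
      (p m = true ∧ ∀ b, j ≤ b → i * b = m → ¬ m < n) := by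
  rw [markA]
  split

  case isTrue h =>
    obtain ⟨-, hjn⟩ := h
    rw [markA_spec n i (j + 1) _ hi m]
    by_cases hm : m = i * j
    · subst hm
      simp only [if_pos]
      constructor
      · rintro ⟨hfalse, -⟩; exact absurd hfalse (by simp)
      · rintro ⟨-, hall⟩
        exact absurd hjn (hall j le_rfl rfl)
    · simp only [if_neg hm]
      constructor
      · rintro ⟨hp, hall⟩
        refine ⟨hp, fun b hb hbm => ?_⟩
        rcases eq_or_lt_of_le hb with rfl | hb'
        · exact absurd hbm.symm hm
        · exact hall b (by omega) hbm
      · rintro ⟨hp, hall⟩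
        exact ⟨hp, fun b hb hbm => hall b (by omega) hbm⟩
  case isFalse h =>
    have hn : ¬ i * j < n := fun hc => h ⟨hi, hc⟩
    constructor
    · intro hp
      refine ⟨hp, fun b hb hbm hmn => ?_⟩
      have : i * j ≤ i * b := mul_le_mul_of_nonneg_left hb (by omega)
      omega
    · exact fun hx => hx.1
termination_by (n - i * j).toNat
decreasing_by
  have h2 : i * (j + 1) = i * j + i := by ring
  omega

theorem isPrimeTD_spec (i : Int) (d : Int) (hd : 1 ≤ d) :
    isPrimeTD i d = true ↔ ∀ e, d ≤ e → e * e ≤ i → i % e ≠ 0 := by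
  rw [isPrimeTD]
  split
  case isTrue h =>
    obtain ⟨hd1, hddi⟩ := h
    by_cases hmod : i % d = 0
    · simp only [if_pos hmod]
      constructor
      · intro hfalse; exact absurd hfalse (by simp)
      · intro hall; exact absurd hmod (hall d le_rfl hddi)
    · simp only [if_neg hmod]
      rw [isPrimeTD_spec i (d + 1) (by omega)]
      constructor
      · intro hall e he hee
        rcases eq_or_lt_of_le he with rfl | he'
        · exact hmod
        · exact hall e (by omega) hee
      · intro hall e he hee
        exact hall e (by omega) hee
  case isFalse h =>
    have hn : ¬ d * d ≤ i := fun hc => h ⟨hd, hc⟩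
    simp only [true_iff]
    intro e he hee
    have : d * d ≤ e * e := mul_le_mul he he (by omega) (by omega)
    omega
termination_by (i + 1 - d).toNat
decreasing_by
  have h2 : d ≤ d * d := le_mul_of_one_le_left (by omega) hd1
  omega

theorem Comp_iff_sq (i : Int) (hi : 2 ≤ i) :
    Comp (i - 1) i ↔ ∃ e, 2 ≤ e ∧ e * e ≤ i ∧ i % e = 0 := by
  constructor
  · rintro ⟨a, b, ha2, hak, hb2, hab⟩
    by_cases hle : a ≤ b
    · refine ⟨a, ha2, ?_, ?_⟩
      · calc a * a ≤ a * b := mul_le_mul_of_nonneg_left hle (by omega)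
          _ = i := hab
      · exact Int.emod_eq_zero_of_dvd ⟨b, hab.symm⟩
    · refine ⟨b, hb2, ?_, ?_⟩
      · calc b * b ≤ a * b := mul_le_mul_of_nonneg_right (by omega) (by omega)
          _ = i := hab
      · exact Int.emod_eq_zero_of_dvd ⟨a, by rw [← hab]; ring⟩
  · rintro ⟨e, he2, hee, hmod⟩
    obtain ⟨b, hb⟩ := Int.dvd_of_emod_eq_zero hmod
    have hbe : e ≤ b := by
      by_contra hc
      push_neg at hc
      have : e * b < e * e := mul_lt_mul_of_pos_left hc (by omega)
      omega
    have h2e : 2 * e ≤ e * e := by nlinarith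
    exact ⟨e, b, he2, by omega, by omega, hb.symm⟩

theorem Comp_mono {k k' m : Int} (h : k ≤ k') : Comp k m → Comp k' m := by
  rintro ⟨a, b, h1, h2, h3, h4⟩; exact ⟨a, b, h1, by omega, h3, h4⟩

theorem Comp_succ (k m : Int) (hk : 2 ≤ k) :
    Comp k m ↔ Comp (k - 1) m ∨ ∃ b, 2 ≤ b ∧ k * b = m := by
  constructor
  · rintro ⟨a, b, h1, h2, h3, h4⟩
    rcases eq_or_lt_of_le h2 with rfl | h'
    · exact Or.inr ⟨b, h3, h4⟩
    · exact Or.inl ⟨a, b, h1, by omega, h3, h4⟩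
  · rintro (h | ⟨b, hb2, hbm⟩)
    · exact Comp_mono (by omega) h
    · exact ⟨k, b, hk, le_rfl, hb2, hbm⟩

-- if k itself is marked, multiples of k are already marked by stage k-1
theorem Comp_absorb (k m : Int) (hck : Comp (k - 1) k)
    (b : Int) (hb2 : 2 ≤ b) (hbm : k * b = m) : Comp (k - 1) m := by
  obtain ⟨c, d, hc2, hck', hd2, hcd⟩ := hck
  refine ⟨c, d * b, hc2, hck', ?_, by rw [← hbm, ← hcd]; ring⟩
  nlinarith

def loopInv (N k : Int) : Prop :=
  (let st := (PySem.List.pyRange 2 k 1).foldl (stepA N) ([], fun _ => true)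
   st.1 = (PySem.List.pyRange 2 k 1).filter (fun i => decide (i % 10 = 3) && isPrimeTD i 2)
   ∧ ∀ m, st.2 m = true ↔ ¬ (Comp (k - 1) m ∧ m < N))

theorem loop_inv_base (N k : Int) (hk : k ≤ 2) : loopInv N k := by
  unfold loopInv
  rw [PySem.List.pyRange_one_eq_nil (by omega)]
  refine ⟨rfl, fun m => ?_⟩
  simp only [List.foldl_nil]
  constructor
  · rintro - ⟨⟨a, b, h1, h2, -, -⟩, -⟩; omega
  · intro _; trivial

theorem loop_inv_step (N k : Int) (hk : 2 ≤ k) (hkN : k < N)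
    (ih : loopInv N k) : loopInv N (k + 1) := by
  unfold loopInv at ih ⊢
  rw [PySem.List.pyRange_one_succ_right (by omega : (2:Int) ≤ k), List.foldl_append,
    List.filter_append]
  simp only [Int.add_sub_cancel]
  obtain ⟨hres, hprime⟩ := ih
  set st := (PySem.List.pyRange 2 k 1).foldl (stepA N) ([], fun _ => true) with hst
  simp only [List.foldl_cons, List.foldl_nil, List.filter_cons, List.filter_nil]
  have hprimek : isPrimeTD k 2 = true ↔ ¬ Comp (k - 1) k := by
    rw [isPrimeTD_spec k 2 (by omega), Comp_iff_sq k hk]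
    constructor
    · intro hall hex
      obtain ⟨e, he2, hee, hmod⟩ := hex
      exact hall e he2 hee hmod
    · intro hne e he hee hmod
      exact hne ⟨e, he, hee, hmod⟩
  by_cases hck : Comp (k - 1) k
  · -- prime[k] is already False: nothing happens
    have hpk : st.2 k = false := by
      have := hprime k
      rcases Bool.eq_false_or_eq_true (st.2 k) with h | h
      · exact absurd ⟨hck, hkN⟩ ((this.mp h))
      · exact h
    have hbk : (decide (k % 10 = 3) && isPrimeTD k 2) = false := by
      have : isPrimeTD k 2 = false := by
        rcases Bool.eq_false_or_eq_true (isPrimeTD k 2) with h | h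
        · exact absurd (hprimek.mp h) (not_not.mpr hck)
        · exact h
      simp [this]
    rw [stepA, hpk]
    simp only [Bool.false_eq_true, if_false, hbk]
    refine ⟨by simpa using hres, fun m => ?_⟩
    rw [hprime m]
    constructor
    · intro h ⟨hc, hmN⟩
      rw [Comp_succ k m (by omega)] at hc
      rcases hc with hc | ⟨b, hb2, hbm⟩
      · exact h ⟨hc, hmN⟩
      · exact h ⟨Comp_absorb k m hck b hb2 hbm, hmN⟩
    · intro h ⟨hc, hmN⟩
      exact h ⟨Comp_mono (by omega) hc, hmN⟩
  · -- prime[k] is True: mark multiples, maybe append k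
    have hpk : st.2 k = true := by
      rw [hprime k]; rintro ⟨hc, -⟩; exact hck hc
    have hbk : isPrimeTD k 2 = true := hprimek.mpr hck
    rw [stepA, hpk]
    simp only [if_true, hbk, Bool.and_true]
    constructor
    · by_cases h10 : k % 10 = 3 <;> simp [h10, hres]
    · intro m
      rw [markA_spec N k 2 st.2 (by omega) m, hprime m]
      constructor
      · rintro ⟨hp, hall⟩ ⟨hc, hmN⟩
        rw [Comp_succ k m (by omega)] at hc
        rcases hc with hc | ⟨b, hb2, hbm⟩
        · exact hp ⟨hc, hmN⟩
        · exact hall b hb2 hbm hmN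
      · intro h
        refine ⟨fun ⟨hc, hmN⟩ => h ⟨Comp_mono (by omega) hc, hmN⟩,
          fun b hb hbm hmN => h ⟨?_, hmN⟩⟩
        exact (Comp_succ k m (by omega)).mpr (Or.inr ⟨b, hb, hbm⟩)

theorem loop_inv_all (N : Int) : ∀ t : Nat, (2 + (t : Int)) ≤ N → loopInv N (2 + t) := by
  intro t
  induction t with
  | zero => intro _; exact loop_inv_base N 2 (by omega)
  | succ s ih =>
    intro h
    have h1 : (2 : Int) + (s : Int) ≤ N := by push_cast at h; omega
    have h2 : (2 : Int) + (s : Int) < N := by push_cast at h; omega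
    have := loop_inv_step N (2 + s) (by omega) h2 (ih h1)
    have hc : (2 : Int) + ((s + 1 : Nat) : Int) = 2 + (s : Int) + 1 := by push_cast; ring
    rw [hc]
    exact this

-- ===== VERDICT (by name: the statement is the Claim_ definition above) =====
theorem helper_spec : Claim_equal_helper := by
  intro n _
  unfold Spec_helper helper helper_alt
  by_cases hn : n ≤ 2
  · rw [PySem.List.pyRange_one_eq_nil (by omega)]; rfl
  · have h2 : (2:Int) + ((n - 2).toNat : Int) = n := by omega
    have := loop_inv_all n (n - 2).toNat (by omega)
    unfold loopInv at this
    rw [h2] at this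
    exact this.1
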